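-- pv_equiv track=rewrite | github.com/GaloisTheory/global-cot-analysis | src/predictions/utils_predictions.py | find_matching_clusters
-- ===== SOURCE A (Python) =====
-- from typing import Dict, List, Any, Optional, Tuple
--
-- def find_matching_clusters(prefix_chunks: List[str], cluster_info: Dict[str, Any]) -> List[str]:
--     """Find clusters that contain the given prefix chunks.
--
--     Preserves the order of prefix_chunks - for each chunk in order, finds the largest
--     matching cluster. Returns clusters in the same order as the chunks.
--     """
--     matching_clusters = []
--
--     # Precompute cluster texts for efficiency
--     cluster_texts_map = {}
--     for cluster_id, cluster_data in cluster_info.items():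
--         cluster_texts = []
--         if "sentences" in cluster_data:
--             for sentence_data in cluster_data["sentences"]:
--                 if "text" in sentence_data:
--                     cluster_texts.append(sentence_data["text"])
--         cluster_texts_map[cluster_id] = cluster_texts
--
--     # Iterate through prefix chunks in order (preserving order is critical!)
--     for chunk_text in prefix_chunks:
--         # Find all clusters that match this chunk, then select the largest one
--         matching_cluster_ids = []
--         for cluster_id, cluster_texts in cluster_texts_map.items():
--             for cluster_text in cluster_texts:
--                 if chunk_text in cluster_text or cluster_text in chunk_text:
--                     matching_cluster_ids.append(cluster_id)
--                     break
--
--         if matching_cluster_ids: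
--             # Find the largest cluster (by number of texts)
--             # If there's a tie, use cluster_id as tie-breaker for determinism
--             largest_cluster_id = max(
--                 matching_cluster_ids, key=lambda cid: (len(cluster_texts_map[cid]), cid)
--             )
--             matching_clusters.append(largest_cluster_id)
--
--     return matching_clusters
-- ===== SOURCE B (Python) =====
-- from typing import Dict, List, Any
--
--
-- def find_matching_clusters(prefix_chunks: List[str], cluster_info: Dict[str, Any]) -> List[str]:
--     """Find clusters that contain the given prefix chunks.
--
--     Same result as the original: for each chunk in order, the largest matching
--     cluster (ties broken by cluster id).  Instead of collecting all matches and
--     taking max per chunk, the cluster ids are pre-sorted once, descending by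
--     (number of texts, cluster id), and each chunk takes the first hit.
--     """
--     cluster_texts_map = {
--         cid: [sd["text"] for sd in cdata.get("sentences", []) if "text" in sd]
--         for cid, cdata in cluster_info.items()
--     }
--     ordered = sorted(
--         cluster_texts_map,
--         key=lambda cid: (len(cluster_texts_map[cid]), cid),
--         reverse=True,
--     )
--     result = []
--     for chunk in prefix_chunks:
--         for cid in ordered:
--             hit = False
--             for t in cluster_texts_map[cid]:
--                 if chunk in t or t in chunk:
--                     hit = True
--                     break
--             if hit:
--                 result.append(cid)
--                 break
--     return result
-- ===== Notes on version B (the rewrite author's own statement) =====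
-- stated objective: alternative
-- what changed: Instead of collecting every matching cluster per chunk and then taking max by (len, cid), B pre-sorts the cluster ids once, descending by (number of texts, cluster id), and for each chunk scans that order and takes the first matching cluster, breaking early.
import Mathlib
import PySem

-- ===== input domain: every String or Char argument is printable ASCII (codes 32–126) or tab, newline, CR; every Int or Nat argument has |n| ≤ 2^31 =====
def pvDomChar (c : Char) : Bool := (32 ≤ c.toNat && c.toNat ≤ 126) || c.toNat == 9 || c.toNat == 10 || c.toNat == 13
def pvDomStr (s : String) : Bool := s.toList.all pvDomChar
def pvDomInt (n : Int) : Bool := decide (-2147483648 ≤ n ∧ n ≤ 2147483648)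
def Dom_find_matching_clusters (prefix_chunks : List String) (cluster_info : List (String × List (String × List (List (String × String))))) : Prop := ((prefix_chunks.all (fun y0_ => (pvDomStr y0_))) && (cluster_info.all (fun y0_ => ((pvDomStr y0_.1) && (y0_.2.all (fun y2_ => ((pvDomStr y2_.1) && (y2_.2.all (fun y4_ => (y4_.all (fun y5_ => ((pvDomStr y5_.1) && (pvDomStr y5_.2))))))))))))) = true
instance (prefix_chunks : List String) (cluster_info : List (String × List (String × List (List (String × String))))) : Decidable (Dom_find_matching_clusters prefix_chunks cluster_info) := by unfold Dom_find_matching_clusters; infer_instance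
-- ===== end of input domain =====

-- B replaces A's per-chunk 'collect all matching clusters, then max by (len, cid)' pass by one
-- descending pre-sort of the cluster ids by (len, cid) and a first-hit scan per chunk (alternative algorithm).

-- ===== PORT A =====
-- A's inner loop building cluster_texts for one cluster_data (guarded "sentences"/"text" lookups)
def pvA_texts (cdata : List (String × List (List (String × String)))) : List String :=
  let cd := PySem.Dict.ofList cdata
  if cd.contains "sentences" then
    (cd.getD "sentences" []).foldl
      (fun acc sd =>
        if (PySem.Dict.ofList sd).contains "text" then
          acc ++ [(PySem.Dict.ofList sd).getD "text" ""]   -- sd["text"]: the key is present here, so getD is exact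
        else acc) []
  else []

def find_matching_clusters (prefix_chunks : List String) (cluster_info : List (String × List (String × List (List (String × String))))) : List String :=
  let ctm : PySem.Dict String (List String) :=
    (PySem.Dict.ofList cluster_info).items.foldl (fun m p => m.insert p.1 (pvA_texts p.2)) PySem.Dict.empty
  prefix_chunks.foldl
    (fun acc chunk =>
      let ids : List String :=
        ctm.items.foldl
          (fun ids p =>
            -- inner 'for cluster_text in cluster_texts: … break' appends cid once iff some text matches
            if p.2.any (fun t => PySem.Str.isIn chunk t || PySem.Str.isIn t chunk) then ids ++ [p.1]
            else ids) []
      if ids.isEmpty then acc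
      else
        match PySem.List.max2? ids (fun cid => ((ctm.getD cid []).length : Int)) (fun cid => cid) with
        | some m => acc ++ [m]
        | none => acc)   -- unreachable: ids ≠ [] there
    []

-- ===== PORT B =====
-- B's dict-comprehension body: [sd["text"] for sd in cdata.get("sentences", []) if "text" in sd]
def pvB_texts (cdata : List (String × List (List (String × String)))) : List String :=
  ((PySem.Dict.ofList cdata).getD "sentences" []).filterMap
    (fun sd => (PySem.Dict.ofList sd).get? "text")

def find_matching_clusters_alt (prefix_chunks : List String) (cluster_info : List (String × List (String × List (List (String × String))))) : List String :=
  let ctm : PySem.Dict String (List String) :=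
    PySem.Dict.ofList ((PySem.Dict.ofList cluster_info).items.map (fun p => (p.1, pvB_texts p.2)))
  let ordered :=
    PySem.List.sorted2 ctm.keys (fun cid => ((ctm.getD cid []).length : Int)) (fun cid => cid) true
  prefix_chunks.foldl
    (fun acc chunk =>
      match ordered.find?
          (fun cid => (ctm.getD cid []).any (fun t => PySem.Str.isIn chunk t || PySem.Str.isIn t chunk)) with
      | some cid => acc ++ [cid]
      | none => acc)
    []

-- ===== PRECONDITION & SPEC =====
def Spec_find_matching_clusters (prefix_chunks : List String) (cluster_info : List (String × List (String × List (List (String × String))))) (out : List String) : Prop := out = find_matching_clusters_alt prefix_chunks cluster_info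
instance (prefix_chunks : List String) (cluster_info : List (String × List (String × List (List (String × String))))) (out : List String) : Decidable (Spec_find_matching_clusters prefix_chunks cluster_info out) := by unfold Spec_find_matching_clusters; infer_instance

-- ===== CLAIM (what is proved, stated in full; the proofs are below) =====
def Claim_equal_find_matching_clusters : Prop := ∀ (prefix_chunks : List String) (cluster_info : List (String × List (String × List (List (String × String))))), Dom_find_matching_clusters prefix_chunks cluster_info → Spec_find_matching_clusters prefix_chunks cluster_info (find_matching_clusters prefix_chunks cluster_info)

-- ===== LEMMAS AND PROOFS =====

-- The strict 'greater cluster' order both programs use: (len, cid) lexicographically.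
def pvLt (l : String → Int) (a b : String) : Bool :=
  decide (l a < l b) || (!decide (l b < l a) && decide (a < b))

theorem pvLt_irrefl (l : String → Int) (a : String) : pvLt l a a = false := by
  simp [pvLt]

theorem pvLt_asym (l : String → Int) (a b : String) (h : pvLt l a b = true) : pvLt l b a = false := by
  simp only [pvLt, Bool.or_eq_true, Bool.and_eq_true, Bool.not_eq_true', decide_eq_true_eq,
    decide_eq_false_iff_not] at h
  rcases h with h | ⟨h1, h2⟩
  · have n1 : ¬ l b < l a := by omega
    simp [pvLt, n1, h]
  · have n2 : ¬ b < a := asymm h2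
    simp [pvLt, h1, n2]

theorem pvLt_trans (l : String → Int) (a b c : String)
    (hab : pvLt l a b = true) (hbc : pvLt l b c = true) : pvLt l a c = true := by
  simp only [pvLt, Bool.or_eq_true, Bool.and_eq_true, Bool.not_eq_true', decide_eq_true_eq,
    decide_eq_false_iff_not] at *
  rcases hab with h | ⟨h1, h2⟩ <;> rcases hbc with g | ⟨g1, g2⟩
  · exact Or.inl (by omega)
  · exact Or.inl (by omega)
  · exact Or.inl (by omega)
  · exact Or.inr ⟨by omega, lt_trans h2 g2⟩

theorem pvLt_total (l : String → Int) (a b : String) (h : a ≠ b) :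
    pvLt l a b = true ∨ pvLt l b a = true := by
  simp only [pvLt, Bool.or_eq_true, Bool.and_eq_true, Bool.not_eq_true', decide_eq_true_eq,
    decide_eq_false_iff_not]
  rcases lt_trichotomy (l a) (l b) with hl | hl | hl
  · exact Or.inl (Or.inl hl)
  · rcases lt_or_gt_of_ne h with hs | hs
    · exact Or.inl (Or.inr ⟨by omega, hs⟩)
    · exact Or.inr (Or.inr ⟨by omega, hs⟩)
  · exact Or.inr (Or.inl hl)

theorem pvLt_neg_trans (l : String → Int) (a b c : String)
    (hab : pvLt l a b = false) (hbc : pvLt l b c = false) : pvLt l a c = false := by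
  rcases eq_or_ne a b with rfl | hne1
  · exact hbc
  rcases eq_or_ne b c with rfl | hne2
  · exact hab
  have h1 : pvLt l b a = true := (pvLt_total l a b hne1).resolve_left (by simp [hab])
  have h2 : pvLt l c b = true := (pvLt_total l b c hne2).resolve_left (by simp [hbc])
  exact pvLt_asym l c a (pvLt_trans l c b a h2 h1)

-- B's sorting primitive, reduced to its insertion loop
theorem pvInsertBy_nil (l : String → Int) (x : String) :
    PySem.List.insertBy (fun a b => pvLt l b a) x [] = [x] := rfl

theorem pvInsertBy_cons (l : String → Int) (x y : String) (ys : List String) :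
    PySem.List.insertBy (fun a b => pvLt l b a) x (y :: ys) =
      if pvLt l y x then x :: y :: ys else y :: PySem.List.insertBy (fun a b => pvLt l b a) x ys := rfl

theorem pvInsertBy_pairwise (l : String → Int) (x : String) (ys : List String)
    (h : ys.Pairwise (fun u v => pvLt l u v = false)) :
    (PySem.List.insertBy (fun a b => pvLt l b a) x ys).Pairwise (fun u v => pvLt l u v = false) := by
  induction ys with
  | nil => rw [pvInsertBy_nil]; simp
  | cons y ys ih =>
    rw [List.pairwise_cons] at h
    rw [pvInsertBy_cons]
    by_cases hxy : pvLt l y x = true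
    · rw [if_pos hxy]
      refine List.Pairwise.cons ?_ (List.Pairwise.cons h.1 h.2)
      intro z hz
      rcases List.mem_cons.mp hz with heq | hz'
      · rw [heq]; exact pvLt_asym l y x hxy
      · cases hzx : pvLt l x z with
        | false => rfl
        | true =>
          exfalso
          have h5 := h.1 z hz'
          rw [pvLt_trans l y x z hxy hzx] at h5
          exact absurd h5 (by decide)
    · rw [if_neg hxy]
      simp only [Bool.not_eq_true] at hxy
      refine List.Pairwise.cons ?_ (ih h.2)
      intro z hz
      rcases (PySem.List.mem_insertBy _ x z ys).mp hz with heq | hz'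
      · rw [heq]; exact hxy
      · exact h.1 z hz'

theorem pvFoldl_insertBy_pairwise (l : String → Int) (xs acc : List String)
    (h : acc.Pairwise (fun u v => pvLt l u v = false)) :
    (xs.foldl (fun acc x => PySem.List.insertBy (fun a b => pvLt l b a) x acc) acc).Pairwise
      (fun u v => pvLt l u v = false) := by
  induction xs generalizing acc with
  | nil => exact h
  | cons x xs ih => exact ih _ (pvInsertBy_pairwise l x acc h)

theorem pvSorted_eq (l : String → Int) (xs : List String) :
    PySem.List.sorted2 xs (fun c => l c) (fun c => c) true =
      xs.foldl (fun acc x => PySem.List.insertBy (fun a b => pvLt l b a) x acc) [] := rfl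

theorem pvSorted_pairwise (l : String → Int) (xs : List String) :
    (PySem.List.sorted2 xs (fun c => l c) (fun c => c) true).Pairwise
      (fun u v => pvLt l u v = false) := by
  rw [pvSorted_eq]
  exact pvFoldl_insertBy_pairwise l xs [] List.Pairwise.nil

theorem pvFoldl_ext {α β : Type} (f g : β → α → β) (h : ∀ a c, f a c = g a c)
    (L : List α) (a : β) : L.foldl f a = L.foldl g a := by
  have : f = g := funext fun x => funext fun y => h x y
  rw [this]

-- A's max primitive, reduced to its running-max loop
def pvStep (l : String → Int) (acc : Option String) (x : String) : Option String :=
  match acc with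
  | none => some x
  | some m => if pvLt l m x then some x else some m

theorem pvMax2_eq_foldl (l : String → Int) (xs : List String) :
    PySem.List.max2? xs (fun c => l c) (fun c => c) = xs.foldl (pvStep l) none := by
  unfold PySem.List.max2? pvStep pvLt
  exact pvFoldl_ext _ _ (fun acc x => by cases acc <;> rfl) xs none

theorem pvMax2_aux (l : String → Int) (t : List String) :
    ∀ m0 : String, ∃ m, t.foldl (pvStep l) (some m0) = some m ∧ (m = m0 ∨ m ∈ t) ∧
      pvLt l m m0 = false ∧ ∀ y ∈ t, pvLt l m y = false := by
  induction t with
  | nil => exact fun m0 => ⟨m0, rfl, Or.inl rfl, pvLt_irrefl l m0, by simp⟩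
  | cons x t ih =>
    intro m0
    simp only [List.foldl_cons]
    by_cases h : pvLt l m0 x = true
    · rw [show pvStep l (some m0) x = some x from by simp [pvStep, h]]
      obtain ⟨m, hf, hmem, hmx, hall⟩ := ih x
      refine ⟨m, hf, ?_, ?_, ?_⟩
      · rcases hmem with rfl | hm
        · exact Or.inr List.mem_cons_self
        · exact Or.inr (List.mem_cons_of_mem _ hm)
      · cases hc : pvLt l m m0 with
        | false => rfl
        | true =>
          exfalso
          have h6 := pvLt_trans l m m0 x hc h
          rw [hmx] at h6
          exact absurd h6 (by decide)
      · intro y hy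
        rcases List.mem_cons.mp hy with heq | hy'
        · rw [heq]; exact hmx
        · exact hall y hy'
    · simp only [Bool.not_eq_true] at h
      rw [show pvStep l (some m0) x = some m0 from by simp [pvStep, h]]
      obtain ⟨m, hf, hmem, hm0, hall⟩ := ih m0
      refine ⟨m, hf, ?_, hm0, ?_⟩
      · rcases hmem with rfl | hm
        · exact Or.inl rfl
        · exact Or.inr (List.mem_cons_of_mem _ hm)
      · intro y hy
        rcases List.mem_cons.mp hy with heq | hy'
        · rw [heq]; exact pvLt_neg_trans l m m0 x hm0 h
        · exact hall y hy'

theorem pvMax2_spec (l : String → Int) (xs : List String) (hne : xs ≠ []) :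
    ∃ m, PySem.List.max2? xs (fun c => l c) (fun c => c) = some m ∧ m ∈ xs ∧
      ∀ y ∈ xs, pvLt l m y = false := by
  rw [pvMax2_eq_foldl]
  cases xs with
  | nil => exact absurd rfl hne
  | cons x t =>
    simp only [List.foldl_cons]
    rw [show pvStep l none x = some x from rfl]
    obtain ⟨m, hf, hmem, hmx, hall⟩ := pvMax2_aux l t x
    refine ⟨m, hf, ?_, ?_⟩
    · rcases hmem with rfl | hm
      · exact List.mem_cons_self
      · exact List.mem_cons_of_mem _ hm
    · intro y hy
      rcases List.mem_cons.mp hy with heq | hy'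
      · rw [heq]; exact hmx
      · exact hall y hy'

-- find? on a descending list returns the maximal satisfying element
theorem pvFind_sorted (l : String → Int) (q : String → Bool) (ys : List String)
    (hp : ys.Pairwise (fun u v => pvLt l u v = false)) (m : String)
    (hm : m ∈ ys) (hq : q m = true)
    (hmax : ∀ z ∈ ys, q z = true → z ≠ m → pvLt l z m = true) :
    ys.find? q = some m := by
  induction ys with
  | nil => cases hm
  | cons y ys ih =>
    rw [List.pairwise_cons] at hp
    by_cases hqy : q y = true
    · have : y = m := by
        by_contra hne
        have hlt := hmax y List.mem_cons_self hqy hne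
        have hm' : m ∈ ys := by
          rcases List.mem_cons.mp hm with heq | h
          · exact absurd heq.symm hne
          · exact h
        have h5 := hp.1 m hm'
        rw [hlt] at h5
        exact absurd h5 (by decide)
      subst this
      simp [List.find?, hqy]
    · have hym : m ≠ y := fun h => hqy (h ▸ hq)
      have hm' : m ∈ ys := by
        rcases List.mem_cons.mp hm with heq | h
        · exact absurd heq hym
        · exact h
      have hqy' : q y = false := by simpa using hqy
      simp only [List.find?, hqy']
      exact ih hp.2 hm' (fun z hz hqz hne => hmax z (List.mem_cons_of_mem _ hz) hqz hne)

-- the central per-chunk fact: first hit in B's descending order = A's max of all hits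
theorem pvChunk (l : String → Int) (q : String → Bool) (keys : List String) :
    (PySem.List.sorted2 keys (fun c => l c) (fun c => c) true).find? q =
      PySem.List.max2? (keys.filter q) (fun c => l c) (fun c => c) := by
  have hperm := PySem.List.sorted2_perm keys (fun c => l c) (fun c => c) true
  by_cases hf : keys.filter q = []
  · rw [hf, show PySem.List.max2? ([] : List String) (fun c => l c) (fun c => c) = none from rfl]
    rw [List.find?_eq_none]
    intro x hx hqx
    have hxk : x ∈ keys := hperm.subset hx
    have : x ∈ keys.filter q := List.mem_filter.mpr ⟨hxk, hqx⟩
    rw [hf] at this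
    cases this
  · obtain ⟨m, hmax, hmem, hall⟩ := pvMax2_spec l (keys.filter q) hf
    rw [hmax]
    have hqm : q m = true := (List.mem_filter.mp hmem).2
    have hmk : m ∈ keys := (List.mem_filter.mp hmem).1
    apply pvFind_sorted l q _ (pvSorted_pairwise l keys) m
    · exact hperm.mem_iff.mpr hmk
    · exact hqm
    · intro z hz hqz hne
      have hzk : z ∈ keys := hperm.subset hz
      have hzf : z ∈ keys.filter q := List.mem_filter.mpr ⟨hzk, hqz⟩
      rcases pvLt_total l z m hne with h | h
      · exact h
      · rw [hall z hzf] at h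
        exact absurd h (by simp)

-- A's id-collecting fold is a filter over the keys
theorem pvIds_fold (P : List String → Bool) (g : String → List String)
    (items : List (String × List String)) (hg : ∀ p ∈ items, g p.1 = p.2) :
    ∀ acc : List String,
    items.foldl (fun ids p => if P p.2 then ids ++ [p.1] else ids) acc =
      acc ++ (items.map Prod.fst).filter (fun c => P (g c)) := by
  induction items with
  | nil => intro acc; simp
  | cons p items ih =>
    intro acc
    have hp := hg p List.mem_cons_self
    simp only [List.foldl_cons, List.map_cons, List.filter_cons]
    rw [ih (fun r hr => hg r (List.mem_cons_of_mem _ hr)), hp]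
    by_cases h : P p.2
    · simp [h]
    · simp [h]

-- ofList of a pair list with nodup keys keeps the list as its items
theorem pvItems_ofList {ν : Type} (ps : List (String × ν)) (h : (ps.map Prod.fst).Nodup) :
    (PySem.Dict.ofList ps).items = ps := by
  have := PySem.Dict.items_foldl_insert_fresh ps Prod.fst Prod.snd PySem.Dict.empty
    (fun a _ => PySem.Dict.contains_empty _) h
  simp only [PySem.Dict.ofList, PySem.Dict.update]
  rw [show (fun (acc : PySem.Dict String ν) (p : String × ν) => acc.insert p.1 p.2) =
        (fun (d : PySem.Dict String ν) (a : String × ν) => d.insert a.1 a.2) from rfl]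
  rw [this]
  simp [show (PySem.Dict.empty : PySem.Dict String ν).items = [] from rfl]

-- a generic 'append if' fold is a filterMap
theorem pvFoldl_if_filterMap {X : Type} (c : X → Bool) (g : X → String) (L : List X) :
    ∀ acc : List String,
    L.foldl (fun acc sd => if c sd then acc ++ [g sd] else acc) acc =
      acc ++ L.filterMap (fun sd => if c sd then some (g sd) else none) := by
  induction L with
  | nil => intro acc; simp
  | cons x L ih =>
    intro acc
    simp only [List.foldl_cons, List.filterMap_cons]
    by_cases h : c x
    · rw [if_pos h, if_pos h, ih]
      simp
    · rw [if_neg h, if_neg h, ih]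

-- the guarded "text" lookup of A as the Option lookup of B
theorem pvGetIf (sd : List (String × String)) :
    (PySem.Dict.ofList sd).get? "text" =
      if (PySem.Dict.ofList sd).contains "text" then some ((PySem.Dict.ofList sd).getD "text" "")
      else none := by
  cases hg : (PySem.Dict.ofList sd).get? "text" with
  | none =>
    have hc : (PySem.Dict.ofList sd).contains "text" = false := by
      rw [PySem.Dict.contains_eq_isSome_get?, hg]; rfl
    rw [hc]; rfl
  | some v =>
    have hc : (PySem.Dict.ofList sd).contains "text" = true := by
      rw [PySem.Dict.contains_eq_isSome_get?, hg]; rfl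
    rw [hc, if_pos rfl, PySem.Dict.getD_of_get?_eq_some _ _ hg]

-- the two cluster_texts computations agree
theorem pvTexts_eq (cdata : List (String × List (List (String × String)))) :
    pvA_texts cdata = pvB_texts cdata := by
  simp only [pvA_texts, pvB_texts]
  by_cases hc : (PySem.Dict.ofList cdata).contains "sentences" = true
  · rw [if_pos hc, pvFoldl_if_filterMap (fun sd => (PySem.Dict.ofList sd).contains "text")
      (fun sd => (PySem.Dict.ofList sd).getD "text" "") _ []]
    rw [List.nil_append]
    exact (List.filterMap_congr (fun sd _ => pvGetIf sd)).symm
  · have hc' : (PySem.Dict.ofList cdata).contains "sentences" = false := by simpa using hc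
    rw [if_neg (by simp [hc']), PySem.Dict.getD_of_not_contains _ _ hc']
    rfl

-- the two cluster_texts_map dictionaries agree
theorem pvCtm_eq (cluster_info : List (String × List (String × List (List (String × String))))) :
    (PySem.Dict.ofList cluster_info).items.foldl
        (fun (m : PySem.Dict String (List String)) p => m.insert p.1 (pvA_texts p.2)) PySem.Dict.empty =
      PySem.Dict.ofList ((PySem.Dict.ofList cluster_info).items.map (fun p => (p.1, pvB_texts p.2))) := by
  have hnd : ((PySem.Dict.ofList cluster_info).items.map Prod.fst).Nodup :=
    PySem.Dict.nodup_keys_ofList cluster_info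
  have hA := PySem.Dict.items_foldl_insert_fresh (PySem.Dict.ofList cluster_info).items Prod.fst
    (fun p => pvA_texts p.2) PySem.Dict.empty (fun a _ => PySem.Dict.contains_empty _) hnd
  have hB : (PySem.Dict.ofList ((PySem.Dict.ofList cluster_info).items.map
      (fun p => (p.1, pvB_texts p.2)))).items =
      (PySem.Dict.ofList cluster_info).items.map (fun p => (p.1, pvB_texts p.2)) := by
    apply pvItems_ofList
    rw [List.map_map]
    simpa [Function.comp] using hnd
  apply PySem.Dict.ext
  rw [hB]
  rw [show (fun (m : PySem.Dict String (List String)) (p : String × List (String × List (List (String × String)))) =>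
        m.insert p.1 (pvA_texts p.2)) =
      (fun (d : PySem.Dict String (List String)) (a : String × List (String × List (List (String × String)))) =>
        d.insert a.1 ((fun p => pvA_texts p.2) a)) from rfl]
  rw [hA]
  exact List.map_congr_left (fun p _ => by simp [pvTexts_eq])

-- the per-chunk step functions of the two ports agree (on the common ctm)
theorem pvStep_eq (C : PySem.Dict String (List String)) (hnd : C.keys.Nodup)
    (acc : List String) (chunk : String) :
    (if (C.items.foldl (fun ids p =>
          if p.2.any (fun t => PySem.Str.isIn chunk t || PySem.Str.isIn t chunk) then ids ++ [p.1]
          else ids) []).isEmpty then acc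
     else
       match PySem.List.max2?
           (C.items.foldl (fun ids p =>
             if p.2.any (fun t => PySem.Str.isIn chunk t || PySem.Str.isIn t chunk) then ids ++ [p.1]
             else ids) [])
           (fun cid => ((C.getD cid []).length : Int)) (fun cid => cid) with
       | some m => acc ++ [m]
       | none => acc) =
    (match (PySem.List.sorted2 C.keys (fun cid => ((C.getD cid []).length : Int)) (fun cid => cid)
          true).find?
        (fun cid => (C.getD cid []).any (fun t => PySem.Str.isIn chunk t || PySem.Str.isIn t chunk)) with
     | some cid => acc ++ [cid]
     | none => acc) := by
  have hg : ∀ p ∈ C.items, C.getD p.1 [] = p.2 := by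
    intro p hp
    exact PySem.Dict.getD_of_get?_eq_some _ _
      (PySem.Dict.get?_of_mem_items _ (by simpa using hp) hnd)
  rw [pvIds_fold (fun ts => ts.any (fun t => PySem.Str.isIn chunk t || PySem.Str.isIn t chunk))
    (fun c => C.getD c []) C.items hg []]
  rw [List.nil_append]
  rw [pvChunk (fun cid => ((C.getD cid []).length : Int))
    (fun c => (C.getD c []).any (fun t => PySem.Str.isIn chunk t || PySem.Str.isIn t chunk)) C.keys]
  rw [show C.items.map Prod.fst = C.keys from rfl]
  by_cases he : C.keys.filter
      (fun c => (C.getD c []).any (fun t => PySem.Str.isIn chunk t || PySem.Str.isIn t chunk)) = []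
  · rw [he]
    rfl
  · have he' : (C.keys.filter
        (fun c => (C.getD c []).any (fun t => PySem.Str.isIn chunk t || PySem.Str.isIn t chunk))).isEmpty = false := by
      simpa [List.isEmpty_iff] using he
    rw [he']
    rfl

-- ===== VERDICT (by name: the statement is the Claim_ definition above) =====
theorem find_matching_clusters_spec : Claim_equal_find_matching_clusters := by
  intro pcs ci _
  unfold Spec_find_matching_clusters
  simp only [find_matching_clusters, find_matching_clusters_alt]
  rw [pvCtm_eq ci]
  exact pvFoldl_ext _ _
    (pvStep_eq (PySem.Dict.ofList ((PySem.Dict.ofList ci).items.map (fun p => (p.1, pvB_texts p.2))))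
      (PySem.Dict.nodup_keys_ofList _)) pcs []
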